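-- pv_equiv track=rewrite | github.com/iossifovlab/gpf | DAE/study_groups/study_group.py | combine_families
-- ===== SOURCE A (Python) =====
-- def combine_families(first, second):
--     same_families = set(first.keys()) & set(second.keys())
--     combined_dict = {}
--     combined_dict.update(first)
--     combined_dict.update(second)
--     for sf in same_families:
--         combined_dict[sf] =\
--             first[sf] if len(first[sf]) > len(second[sf]) else second[sf]
--     return combined_dict
-- ===== SOURCE B (Python) =====
-- def combine_families(first, second):
--     combined = {}
--     for key, fam in [*first.items(), *second.items()]:
--         if len(fam) >= len(combined.get(key, [])):
--             combined[key] = fam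
--     return combined
-- ===== Notes on version B (the rewrite author's own statement) =====
-- stated objective: alternative
-- what changed: B computes no key intersection and never distinguishes the two dicts: it reduces the single concatenated item stream first+second into an empty dict with one uniform 'overwrite unless the incoming value is strictly shorter' rule (later entries win length ties), instead of A's copy-first, overwrite-with-second, then patch the intersection back.
import Mathlib
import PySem

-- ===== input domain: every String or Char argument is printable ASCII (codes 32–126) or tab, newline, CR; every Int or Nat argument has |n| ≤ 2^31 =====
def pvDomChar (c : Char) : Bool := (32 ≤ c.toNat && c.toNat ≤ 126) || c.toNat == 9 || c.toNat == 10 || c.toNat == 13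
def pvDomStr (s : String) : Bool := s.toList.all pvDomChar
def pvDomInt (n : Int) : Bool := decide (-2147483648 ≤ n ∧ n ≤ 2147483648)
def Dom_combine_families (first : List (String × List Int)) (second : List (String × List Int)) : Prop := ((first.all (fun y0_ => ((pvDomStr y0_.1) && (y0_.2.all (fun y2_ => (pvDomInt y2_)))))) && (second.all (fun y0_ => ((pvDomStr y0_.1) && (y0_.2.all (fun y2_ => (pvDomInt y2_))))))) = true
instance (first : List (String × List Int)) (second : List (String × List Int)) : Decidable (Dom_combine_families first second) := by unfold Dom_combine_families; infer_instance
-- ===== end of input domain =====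

-- B merges by reducing the single concatenated item stream first+second with one uniform
-- 'overwrite unless strictly shorter' rule (no intersection, no copy-then-patch); objective: alternative, same cost.

-- ===== PORT A =====
-- first[sf]/second[sf] in the loop look up keys of same_families, which are present in both dicts,
-- so the total getD is exact there (no KeyError is reachable).
def combine_families (first : List (String × List Int)) (second : List (String × List Int)) : List (String × List Int) :=
  let firstD : PySem.Dict String (List Int) := PySem.Dict.mk first
  let secondD : PySem.Dict String (List Int) := PySem.Dict.mk second
  let same_families : PySem.Set String :=
    PySem.Set.inter (PySem.Set.ofList firstD.keys) (PySem.Set.ofList secondD.keys)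
  let combined := PySem.Dict.empty.update firstD.items
  let combined := combined.update secondD.items
  -- the Python iterates the set in hash order; the result does not depend on the order
  -- (each iteration overwrites a distinct key in place), so folding in the Set's list order is exact
  let combined := same_families.foldl (fun d sf =>
      d.insert sf (if PySem.List.len (firstD.getD sf []) > PySem.List.len (secondD.getD sf [])
                   then firstD.getD sf [] else secondD.getD sf [])) combined
  combined.items

-- ===== PORT B =====
-- the loop body of Source B: overwrite combined[key] unless the incoming value is strictly shorter
def bstep (d : PySem.Dict String (List Int)) (p : String × List Int) : PySem.Dict String (List Int) :=
  if PySem.List.len p.2 ≥ PySem.List.len (d.getD p.1 []) then d.insert p.1 p.2 else d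

def combine_families_alt (first : List (String × List Int)) (second : List (String × List Int)) : List (String × List Int) :=
  ((first ++ second).foldl bstep PySem.Dict.empty).items

-- ===== PRECONDITION & SPEC =====
-- Pre_ excludes association lists with duplicate keys: those do not represent a Python dict
-- (dict inputs always have unique keys), so A's behaviour on them is not defined by the source.
def Pre_combine_families (first : List (String × List Int)) (second : List (String × List Int)) : Prop :=
  (first.map Prod.fst).Nodup ∧ (second.map Prod.fst).Nodup
instance (first : List (String × List Int)) (second : List (String × List Int)) : Decidable (Pre_combine_families first second) := by unfold Pre_combine_families; infer_instance
def pvWitness_combine_families : (List (String × List Int)) × (List (String × List Int)) :=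
  ([("a", [1]), ("c", [])], [("a", [1, 2]), ("b", [7])])

def Spec_combine_families (first : List (String × List Int)) (second : List (String × List Int)) (out : List (String × List Int)) : Prop := out = combine_families_alt first second
instance (first : List (String × List Int)) (second : List (String × List Int)) (out : List (String × List Int)) : Decidable (Spec_combine_families first second out) := by unfold Spec_combine_families; infer_instance

-- ===== CLAIM (what is proved, stated in full; the proofs are below) =====
def Claim_equal_combine_families : Prop := ∀ (first : List (String × List Int)) (second : List (String × List Int)), Dom_combine_families first second → Pre_combine_families first second → Spec_combine_families first second (combine_families first second)

-- ===== LEMMAS AND PROOFS =====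

-- common normal form of both results: first's entries patched against second, then second's fresh keys
def FC (second : List (String × List Int)) (q : String × List Int) : String × List Int :=
  match second.find? (fun p => p.1 == q.1) with
  | some p => (q.1, if PySem.List.len q.2 > PySem.List.len p.2 then q.2 else p.2)
  | none => q

theorem ow_items (l : List String) (c : String → List Int) :
    ∀ d : PySem.Dict String (List Int), (∀ k ∈ l, d.contains k = true) →
      (l.foldl (fun d k => d.insert k (c k)) d).items =
        d.items.map (fun q => if l.contains q.1 then (q.1, c q.1) else q) := by
  induction l with
  | nil => simp
  | cons k l ih =>
    intro d hall
    rw [List.foldl_cons, ih (d.insert k (c k)) (by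
      intro j hj
      rw [PySem.Dict.contains_insert]
      simp [hall j (List.mem_cons_of_mem _ hj)]),
      PySem.Dict.items_insert_of_contains _ _ (hall k (List.mem_cons_self))]
    rw [List.map_map]
    apply List.map_congr_left
    intro q _
    by_cases h : q.1 = k
    · simp [Function.comp, h]
    · simp [Function.comp, h]

theorem upd_items (l : List (String × List Int)) (hl : (l.map Prod.fst).Nodup) :
    ∀ d : PySem.Dict String (List Int),
      (l.foldl (fun acc p => acc.insert p.1 p.2) d).items =
        d.items.map (fun q => match l.find? (fun p => p.1 == q.1) with
                              | some p => (q.1, p.2)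
                              | none => q)
        ++ l.filter (fun p => !(d.contains p.1)) := by
  induction l with
  | nil => simp
  | cons p l ih =>
    intro d
    simp only [List.map_cons, List.nodup_cons] at hl
    obtain ⟨hp, hl'⟩ := hl
    have hfind_none : l.find? (fun r => r.1 == p.1) = none := by
      rw [List.find?_eq_none]
      intro r hr
      simp only [beq_iff_eq]
      exact fun h => hp (h ▸ List.mem_map_of_mem hr)
    rw [List.foldl_cons, ih hl' (d.insert p.1 p.2)]
    have hfe : l.filter (fun q => !((d.insert p.1 p.2).contains q.1)) =
        l.filter (fun q => !(d.contains q.1)) := by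
      apply List.filter_congr
      intro q hq
      have hne : q.1 ≠ p.1 := fun h => hp (h ▸ List.mem_map_of_mem hq)
      simp [PySem.Dict.contains_insert, hne]
    rw [hfe]
    by_cases hc : d.contains p.1 = true
    · rw [PySem.Dict.items_insert_of_contains _ _ hc, List.map_map, List.filter_cons]
      rw [show (!d.contains p.1) = false by simp [hc], if_neg Bool.false_ne_true]
      congr 1
      apply List.map_congr_left
      intro q _
      by_cases h : q.1 = p.1
      · simp [Function.comp, h, hfind_none]
      · have : (p.1 == q.1) = false := by simpa using fun hh => h hh.symm
        simp [Function.comp, h, this]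
    · rw [PySem.Dict.items_insert_of_not_contains _ _ (by simpa using hc), List.map_append,
        List.filter_cons]
      simp only [hc, Bool.not_false]
      rw [List.append_assoc]
      congr 1
      · apply List.map_congr_left
        intro q hq
        have hqne : (p.1 == q.1) = false := by
          have : q.1 ≠ p.1 := by
            intro h
            rw [PySem.Dict.contains] at hc
            exact hc (List.any_eq_true.mpr ⟨q, hq, by simp [h]⟩)
          simpa using fun hh => this hh.symm
        simp [hqne]
      · simp [hfind_none]

theorem ofList_items (l : List (String × List Int)) (hl : (l.map Prod.fst).Nodup) :
    (PySem.Dict.ofList l).items = l := by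
  rw [PySem.Dict.ofList, PySem.Dict.update, upd_items l hl]
  simp [PySem.Dict.empty]

theorem A_eq (first second : List (String × List Int))
    (hf : (first.map Prod.fst).Nodup) (hs : (second.map Prod.fst).Nodup) :
    combine_families first second =
      first.map (FC second) ++
        second.filter (fun p => !(first.any (fun a => a.1 == p.1))) := by
  simp only [combine_families]
  -- the two update folds
  have hD0 : (PySem.Dict.empty.update first).items = first := ofList_items first hf
  have hD1 : ((PySem.Dict.empty.update first).update second).items =
      first.map (fun q : String × List Int =>
        match second.find? (fun p => p.1 == q.1) with
        | some p => (q.1, p.2)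
        | none => q)
      ++ second.filter (fun p => !(first.any (fun a => a.1 == p.1))) := by
    rw [PySem.Dict.update, upd_items second hs, hD0]
    congr 1
    apply List.filter_congr
    intro p _
    simp only [PySem.Dict.contains, hD0]
  -- the same_families set
  set same : PySem.Set String :=
    PySem.Set.inter (PySem.Set.ofList (PySem.Dict.mk first).keys)
      (PySem.Set.ofList (PySem.Dict.mk second).keys) with hsame
  have hmem_same : ∀ k, k ∈ same ↔ (k ∈ first.map Prod.fst ∧ k ∈ second.map Prod.fst) := by
    intro k
    rw [hsame]
    simp [PySem.Set.inter, List.mem_filter, PySem.Set.mem_ofList, PySem.Dict.keys]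
  have hG2fst : ∀ a : String × List Int,
      ((fun q : String × List Int =>
        match second.find? (fun p : String × List Int => p.1 == q.1) with
        | some p => (q.1, p.2)
        | none => q) a).1 = a.1 := by
    intro a
    cases hr : second.find? (fun p => p.1 == a.1) <;> simp [hr]
  have hcont : ∀ k ∈ same, ((PySem.Dict.empty.update first).update second).contains k = true := by
    intro k hk
    obtain ⟨hk1, _⟩ := (hmem_same k).mp hk
    obtain ⟨q, hq, rfl⟩ := List.mem_map.mp hk1
    simp only [PySem.Dict.contains, hD1, List.any_append, List.any_map]
    have : first.any ((fun p : String × List Int => p.1 == q.1) ∘ (fun q : String × List Int =>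
        match second.find? (fun p : String × List Int => p.1 == q.1) with
        | some p => (q.1, p.2)
        | none => q)) = true :=
      List.any_eq_true.mpr ⟨q, hq, by simp [Function.comp, hG2fst q]⟩
    simp [this]
  rw [ow_items same _ _ hcont, hD1, List.map_append, List.map_map]
  congr 1
  · -- first part: overwrite composed with G2 is FC
    apply List.map_congr_left
    intro q hq
    cases hr : second.find? (fun p => p.1 == q.1) with
    | none =>
      have hns : q.1 ∉ second.map Prod.fst := by
        intro hmem
        obtain ⟨r, hrmem, hre⟩ := List.mem_map.mp hmem
        rw [List.find?_eq_none] at hr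
        have := hr r hrmem
        simp only [beq_iff_eq] at this
        exact this hre
      have hnmem : q.1 ∉ same := fun h => hns ((hmem_same q.1).mp h).2
      simp [Function.comp, hr, FC, hnmem]
    | some r =>
      have hrmem : r ∈ second := List.mem_of_find?_eq_some hr
      have hre : r.1 = q.1 := by simpa using List.find?_some hr
      have hcmem : q.1 ∈ same := (hmem_same q.1).mpr
        ⟨List.mem_map_of_mem hq, hre ▸ List.mem_map_of_mem hrmem⟩
      have hgf : (PySem.Dict.mk first).getD q.1 [] = q.2 :=
        PySem.Dict.getD_of_mem_items (PySem.Dict.mk first) hq hf []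
      have hgs : (PySem.Dict.mk second).getD q.1 [] = r.2 := by
        simp [PySem.Dict.getD, PySem.Dict.get?, hr]
      simp [Function.comp, hr, FC, hcmem, hgf, hgs]
  · -- second part: the appended fresh keys are untouched by the overwrite
    conv_rhs => rw [← List.map_id
      (second.filter (fun p => !(first.any (fun a => a.1 == p.1))))]
    apply List.map_congr_left
    intro q hqf
    obtain ⟨hqs, hcond⟩ := List.mem_filter.mp hqf
    have hany : first.any (fun a => a.1 == q.1) = false := by simpa using hcond
    have hnf : q.1 ∉ first.map Prod.fst := by
      intro hmem
      obtain ⟨a, ha, hae⟩ := List.mem_map.mp hmem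
      rw [List.any_eq_false] at hany
      have := hany a ha
      simp only [beq_iff_eq] at this
      exact this hae
    have hnmem : q.1 ∉ same := fun h => hnf ((hmem_same q.1).mp h).1
    simp [hnmem]

-- === B side ===

-- how one bstep transforms the items list of a nodup-keyed dict
def GB (r q : String × List Int) : String × List Int :=
  if q.1 = r.1 then (q.1, if PySem.List.len r.2 ≥ PySem.List.len q.2 then r.2 else q.2) else q

theorem GB_fst (r q : String × List Int) : (GB r q).1 = q.1 := by
  unfold GB; split <;> simp_all

theorem bfold_fresh (l : List (String × List Int)) :
    ∀ d : PySem.Dict String (List Int),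
      (∀ p ∈ l, d.contains p.1 = false) → (l.map Prod.fst).Nodup →
      (l.foldl bstep d).items = d.items ++ l := by
  induction l with
  | nil => simp
  | cons p l ih =>
    intro d hfr hl
    simp only [List.map_cons, List.nodup_cons] at hl
    have hc : d.contains p.1 = false := hfr p List.mem_cons_self
    have hge : PySem.List.len p.2 ≥ PySem.List.len (d.getD p.1 []) := by
      rw [PySem.Dict.getD_of_not_contains d [] hc]
      simp [PySem.List.len_eq]
    rw [List.foldl_cons, show bstep d p = d.insert p.1 p.2 by unfold bstep; rw [if_pos hge],
      ih (d.insert p.1 p.2) (by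
        intro q hq
        rw [PySem.Dict.contains_insert]
        have hne : q.1 ≠ p.1 := fun h => hl.1 (h ▸ List.mem_map_of_mem hq)
        simp [hne, hfr q (List.mem_cons_of_mem _ hq)]) hl.2,
      PySem.Dict.items_insert_of_not_contains _ _ (by simpa using hc)]
    simp

theorem bstep_items (d : PySem.Dict String (List Int)) (l : List (String × List Int))
    (hd : d.items = l) (hl : (l.map Prod.fst).Nodup) (r : String × List Int) :
    (bstep d r).items = if l.any (fun a => a.1 == r.1) then l.map (GB r) else l ++ [r] := by
  have hkn : d.keys.Nodup := by simpa [PySem.Dict.keys, hd] using hl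
  by_cases hc : l.any (fun a => a.1 == r.1) = true
  · obtain ⟨q, hq, hqe⟩ := List.any_eq_true.mp hc
    simp only [beq_iff_eq] at hqe
    have hcont : d.contains r.1 = true := by
      rw [PySem.Dict.contains, hd]
      exact List.any_eq_true.mpr ⟨q, hq, by simp [hqe]⟩
    have hget : d.getD r.1 [] = q.2 := hqe ▸ PySem.Dict.getD_of_mem_items d (hd ▸ hq) hkn []
    have hval : ∀ p ∈ l, p.1 = r.1 → p.2 = q.2 := by
      intro p hp hpe
      have := hpe ▸ PySem.Dict.getD_of_mem_items d (hd ▸ hp) hkn ([] : List Int)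
      rw [hget] at this
      exact this.symm
    rw [if_pos hc]
    unfold bstep
    rw [hget]
    by_cases hlen : q.2.length ≤ r.2.length
    · rw [if_pos (by simpa [PySem.List.len_eq] using hlen),
        PySem.Dict.items_insert_of_contains _ _ hcont, hd]
      apply List.map_congr_left
      intro p hp
      by_cases hpe : p.1 = r.1
      · simp [GB, hpe, hval p hp hpe, PySem.List.len_eq, hlen]
      · have : (p.1 == r.1) = false := by simpa using hpe
        simp [GB, hpe, this]
    · rw [if_neg (by simpa [PySem.List.len_eq] using hlen), hd]
      conv_lhs => rw [← List.map_id l]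
      apply List.map_congr_left
      intro p hp
      by_cases hpe : p.1 = r.1
      · have hlen2 : ¬ p.2.length ≤ r.2.length := by rw [hval p hp hpe]; exact hlen
        simp only [id_eq, GB, if_pos hpe]
        rw [if_neg (by simpa [PySem.List.len_eq, ge_iff_le, Nat.cast_le] using hlen2)]
      · simp [GB, hpe]
  · have hcb : l.any (fun a => a.1 == r.1) = false := eq_false_of_ne_true hc
    have hcont : d.contains r.1 = false := by rw [PySem.Dict.contains, hd]; exact hcb
    have hge : PySem.List.len r.2 ≥ PySem.List.len (d.getD r.1 []) := by
      rw [PySem.Dict.getD_of_not_contains d [] hcont]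
      simp [PySem.List.len_eq]
    rw [if_neg hc, show bstep d r = d.insert r.1 r.2 by unfold bstep; rw [if_pos hge],
      PySem.Dict.items_insert_of_not_contains _ _ (by simpa using hcont), hd]

theorem FC_cons_of_ne (r : String × List Int) (rest : List (String × List Int))
    (q : String × List Int) (hne : q.1 ≠ r.1) : FC (r :: rest) q = FC rest q := by
  unfold FC
  rw [List.find?_cons_of_neg (by simpa using fun h => hne h.symm)]

theorem FC_of_none (rest : List (String × List Int)) (q : String × List Int)
    (h : q.1 ∉ rest.map Prod.fst) : FC rest q = q := by
  unfold FC
  rw [List.find?_eq_none.mpr (by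
    intro p hp
    simp only [beq_iff_eq]
    exact fun he => h (he ▸ List.mem_map_of_mem hp))]

theorem bfold_second (second : List (String × List Int)) :
    ∀ (l : List (String × List Int)) (d : PySem.Dict String (List Int)),
      d.items = l → (l.map Prod.fst).Nodup → (second.map Prod.fst).Nodup →
      (second.foldl bstep d).items =
        l.map (FC second) ++ second.filter (fun p => !(l.any (fun a => a.1 == p.1))) := by
  induction second with
  | nil =>
    intro l d hd _ _
    have : l.map (FC []) = l := by
      conv_rhs => rw [← List.map_id l]
      exact List.map_congr_left (fun q _ => FC_of_none [] q (by simp))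
    simpa [this] using hd
  | cons r rest ih =>
    intro l d hd hl hs
    simp only [List.map_cons, List.nodup_cons] at hs
    have hrrest : r.1 ∉ rest.map Prod.fst := hs.1
    rw [List.foldl_cons]
    by_cases hc : l.any (fun a => a.1 == r.1) = true
    · -- shared key: the entry with key r.1 is patched in place
      have hd' : (bstep d r).items = l.map (GB r) := by rw [bstep_items d l hd hl r, if_pos hc]
      have hkeys : (l.map (GB r)).map Prod.fst = l.map Prod.fst := by
        rw [List.map_map]
        exact List.map_congr_left (fun q _ => GB_fst r q)
      rw [ih (l.map (GB r)) (bstep d r) hd' (by rw [hkeys]; exact hl) hs.2]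
      have hmap : (l.map (GB r)).map (FC rest) = l.map (FC (r :: rest)) := by
        rw [List.map_map]
        apply List.map_congr_left
        intro q _
        by_cases hqe : q.1 = r.1
        · have h1 : GB r q = (q.1, if PySem.List.len r.2 ≥ PySem.List.len q.2 then r.2 else q.2) := by
            simp [GB, hqe]
          have h2 : FC rest (GB r q) = GB r q := by
            apply FC_of_none
            rw [GB_fst, hqe]; exact hrrest
          have h3 : FC (r :: rest) q =
              (q.1, if PySem.List.len q.2 > PySem.List.len r.2 then q.2 else r.2) := by
            unfold FC
            rw [List.find?_cons_of_pos (by simp [hqe])]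
          rw [Function.comp_apply, h2, h1, h3]
          by_cases h : PySem.List.len q.2 > PySem.List.len r.2
          · rw [if_neg (by omega), if_pos h]
          · rw [if_pos (by omega), if_neg h]
        · have hgq : GB r q = q := by simp [GB, hqe]
          rw [Function.comp_apply, hgq, FC_cons_of_ne r rest q hqe]
      have hfilt : rest.filter (fun p => !((l.map (GB r)).any (fun a => a.1 == p.1))) =
          rest.filter (fun p => !(l.any (fun a => a.1 == p.1))) := by
        apply List.filter_congr
        intro p _
        congr 1
        rw [List.any_map]
        exact List.any_congr rfl (fun a => by simp [Function.comp, GB_fst])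
      rw [hmap, hfilt, List.filter_cons, show (!l.any (fun a => a.1 == r.1)) = false by simp [hc],
        if_neg Bool.false_ne_true]
    · -- fresh key: r is appended and survives untouched
      have hcb : l.any (fun a => a.1 == r.1) = false := eq_false_of_ne_true hc
      have hd' : (bstep d r).items = l ++ [r] := by rw [bstep_items d l hd hl r, if_neg hc]
      have hnl : r.1 ∉ l.map Prod.fst := by
        intro hmem
        obtain ⟨a, ha, hae⟩ := List.mem_map.mp hmem
        exact List.any_eq_false.mp hcb a ha (by simp [hae])
      have hnd : ((l ++ [r]).map Prod.fst).Nodup := by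
        rw [List.map_append]
        simp only [List.map_cons, List.map_nil]
        refine List.Nodup.append hl (List.nodup_singleton _) ?_
        intro x hx hy
        simp only [List.mem_singleton] at hy
        exact hnl (hy ▸ hx)
      rw [ih (l ++ [r]) (bstep d r) hd' hnd hs.2, List.map_append]
      have hmapl : l.map (FC rest) = l.map (FC (r :: rest)) := by
        apply List.map_congr_left
        intro q hq
        refine (FC_cons_of_ne r rest q ?_).symm
        intro h
        exact hnl (by rw [← h]; exact List.mem_map_of_mem hq)
      have hmapr : [r].map (FC rest) = [r] := by
        simp [FC_of_none rest r hrrest]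
      have hfilt : rest.filter (fun p => !((l ++ [r]).any (fun a => a.1 == p.1))) =
          rest.filter (fun p => !(l.any (fun a => a.1 == p.1))) := by
        apply List.filter_congr
        intro p hp
        have hne : (r.1 == p.1) = false := by
          apply beq_eq_false_iff_ne.mpr
          intro h
          exact hrrest (by rw [h]; exact List.mem_map_of_mem hp)
        simp [List.any_append, hne]
      rw [hmapl, hmapr, hfilt, List.filter_cons,
        show (!l.any (fun a => a.1 == r.1)) = true by simp [hcb], if_pos rfl, List.append_assoc]
      rfl

theorem B_eq (first second : List (String × List Int))
    (hf : (first.map Prod.fst).Nodup) (hs : (second.map Prod.fst).Nodup) :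
    combine_families_alt first second =
      first.map (FC second) ++
        second.filter (fun p => !(first.any (fun a => a.1 == p.1))) := by
  unfold combine_families_alt
  rw [List.foldl_append]
  have h0 : (first.foldl bstep PySem.Dict.empty).items = first := by
    rw [bfold_fresh first PySem.Dict.empty (fun p _ => by simp [PySem.Dict.contains_empty]) hf]
    simp [PySem.Dict.empty]
  exact bfold_second second first _ h0 hf hs

-- ===== VERDICT (by name: the statement is the Claim_ definition above) =====
theorem combine_families_spec : Claim_equal_combine_families := by
  intro first second _ hpre
  unfold Spec_combine_families
  rw [A_eq first second hpre.1 hpre.2, B_eq first second hpre.1 hpre.2]
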